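-- pv_equiv track=rewrite | github.com/dronovroman/gh2021 | step_5_topic_modelling.py | get_l1_basedon_l2
-- ===== SOURCE A (Python) =====
-- def get_l1_basedon_l2(topics, l2): #l2 is a list of l2 topics
--     ll = []
--     for l in l2:
--         return_key = ""
--         for key in topics.keys():
--             if l in topics[key]:
--                 return_key = key
--         ll.append(return_key)
--     return ll
-- ===== SOURCE B (Python) =====
-- def get_l1_basedon_l2(topics, l2):
--     rev = {}
--     for key in topics.keys():
--         for v in topics[key]:
--             rev[v] = key  # last containing key wins, matching A's scan
--     return [rev.get(l, "") for l in l2]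
-- ===== Notes on version B (the rewrite author's own statement) =====
-- stated objective: faster
-- what changed: Replaces the per-l2-element inner scan over all topic keys with a reverse index built once (value -> last containing key), followed by a single flat lookup pass with default "".
import Mathlib
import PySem

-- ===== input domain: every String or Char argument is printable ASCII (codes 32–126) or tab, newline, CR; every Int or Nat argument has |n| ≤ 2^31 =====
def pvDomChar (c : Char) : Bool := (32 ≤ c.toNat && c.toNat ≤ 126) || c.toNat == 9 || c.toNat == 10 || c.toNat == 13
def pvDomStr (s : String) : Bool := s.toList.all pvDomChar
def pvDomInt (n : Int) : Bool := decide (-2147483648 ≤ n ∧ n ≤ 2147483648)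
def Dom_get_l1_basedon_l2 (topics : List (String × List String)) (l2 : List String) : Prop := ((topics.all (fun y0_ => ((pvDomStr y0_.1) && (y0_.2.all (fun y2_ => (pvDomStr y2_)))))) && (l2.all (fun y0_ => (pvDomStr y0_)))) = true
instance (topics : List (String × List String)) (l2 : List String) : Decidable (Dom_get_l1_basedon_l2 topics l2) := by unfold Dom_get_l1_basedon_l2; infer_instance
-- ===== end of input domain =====

-- B replaces A's per-l2-element scan over all topic keys with a reverse index built once (value -> last containing key), then flat lookups with default "".


-- ===== PORT A =====
-- topics is a Python dict: interpret the association list through PySem.Dict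
def get_l1_basedon_l2 (topics : List (String × List String)) (l2 : List String) : List String :=
  let d := PySem.Dict.ofList topics
  l2.foldl (fun ll l =>
    ll ++ [d.keys.foldl (fun return_key key =>
      if l ∈ d.getD key [] then key else return_key) ""]) []

-- ===== PORT B =====
def get_l1_basedon_l2_alt (topics : List (String × List String)) (l2 : List String) : List String :=
  let d := PySem.Dict.ofList topics
  let rev := d.keys.foldl (fun rev key =>
    (d.getD key []).foldl (fun rev v => rev.insert v key) rev) PySem.Dict.empty
  l2.map (fun l => rev.getD l "")

-- ===== PRECONDITION & SPEC =====
def Spec_get_l1_basedon_l2 (topics : List (String × List String)) (l2 : List String) (out : List String) : Prop := out = get_l1_basedon_l2_alt topics l2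
instance (topics : List (String × List String)) (l2 : List String) (out : List String) : Decidable (Spec_get_l1_basedon_l2 topics l2 out) := by unfold Spec_get_l1_basedon_l2; infer_instance

-- ===== CLAIM (what is proved, stated in full; the proofs are below) =====
def Claim_equal_get_l1_basedon_l2 : Prop := ∀ (topics : List (String × List String)) (l2 : List String), Dom_get_l1_basedon_l2 topics l2 → Spec_get_l1_basedon_l2 topics l2 (get_l1_basedon_l2 topics l2)

-- ===== LEMMAS AND PROOFS =====

-- inner loop of B's index build: inserting every v of vals at key, then looking up l
theorem getD_foldl_insert_const {vals : List String} {key l : String} (rev : PySem.Dict String String) :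
    (vals.foldl (fun rev v => rev.insert v key) rev).getD l "" =
      if l ∈ vals then key else rev.getD l "" := by
  induction vals generalizing rev with
  | nil => simp
  | cons v vs ih =>
    simp only [List.foldl_cons, ih, PySem.Dict.getD_insert, List.mem_cons]
    split_ifs with h1 h2 h3 <;> simp_all

-- B's whole index build vs A's inner scan, for any starting index rev
theorem getD_rev_build (ks : List String) (g : String → List String) (l : String)
    (rev : PySem.Dict String String) :
    (ks.foldl (fun rev key => (g key).foldl (fun rev v => rev.insert v key) rev) rev).getD l "" =
      ks.foldl (fun return_key key => if l ∈ g key then key else return_key) (rev.getD l "") := by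
  induction ks generalizing rev with
  | nil => rfl
  | cons k ks ih =>
    simp only [List.foldl_cons, ih, getD_foldl_insert_const]

-- ===== VERDICT (by name: the statement is the Claim_ definition above) =====
theorem get_l1_basedon_l2_spec : Claim_equal_get_l1_basedon_l2 := by
  intro topics l2 _
  unfold Spec_get_l1_basedon_l2 get_l1_basedon_l2 get_l1_basedon_l2_alt
  rw [PySem.List.foldl_append_singleton_eq_map]
  refine List.map_congr_left (fun l _ => ?_)
  rw [getD_rev_build]
  rfl
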